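-- pv_equiv track=rewrite | github.com/laituan245/rescnn_bioel | compare_models.py | check_label
-- ===== SOURCE A (Python) =====
-- def check_label(gt_entity_ids, topk_entity_ids):
--     crtx_top1, crtx_top5, crtx_top10, crtx_top20 = 0, 0, 0, 0
--     for gt_entity_id in gt_entity_ids:
--         for i in range(min(20, len(topk_entity_ids))):
--             assert(not '+' in topk_entity_ids[i])
--             pred_entity_ids = topk_entity_ids[i].split('|')
--             if gt_entity_id in pred_entity_ids:
--                 if i < 1: crtx_top1 = 1
--                 if i < 5: crtx_top5 = 1
--                 if i < 10: crtx_top10 = 1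
--                 if i < 20: crtx_top20 = 1
--     return crtx_top1, crtx_top5, crtx_top10, crtx_top20
-- ===== SOURCE B (Python) =====
-- def check_label(gt_entity_ids, topk_entity_ids):
--     if not gt_entity_ids:
--         return 0, 0, 0, 0
--     gt = set(gt_entity_ids)
--     best = None
--     for i in range(min(20, len(topk_entity_ids))):
--         assert not '+' in topk_entity_ids[i]
--         if best is None and any(p in gt for p in topk_entity_ids[i].split('|')):
--             best = i
--     if best is None:
--         return 0, 0, 0, 0
--     return int(best < 1), int(best < 5), int(best < 10), int(best < 20)
-- ===== Notes on version B (the rewrite author's own statement) =====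
-- stated objective: faster
-- what changed: Replaces A's nested gt-by-topk loops that re-split and rescan the top-20 entries once per gt id with a single ascending scan that finds the first top-20 rank whose split ids intersect a prebuilt gt set, from which all four 0/1 flags are derived in closed form.
import Mathlib
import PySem

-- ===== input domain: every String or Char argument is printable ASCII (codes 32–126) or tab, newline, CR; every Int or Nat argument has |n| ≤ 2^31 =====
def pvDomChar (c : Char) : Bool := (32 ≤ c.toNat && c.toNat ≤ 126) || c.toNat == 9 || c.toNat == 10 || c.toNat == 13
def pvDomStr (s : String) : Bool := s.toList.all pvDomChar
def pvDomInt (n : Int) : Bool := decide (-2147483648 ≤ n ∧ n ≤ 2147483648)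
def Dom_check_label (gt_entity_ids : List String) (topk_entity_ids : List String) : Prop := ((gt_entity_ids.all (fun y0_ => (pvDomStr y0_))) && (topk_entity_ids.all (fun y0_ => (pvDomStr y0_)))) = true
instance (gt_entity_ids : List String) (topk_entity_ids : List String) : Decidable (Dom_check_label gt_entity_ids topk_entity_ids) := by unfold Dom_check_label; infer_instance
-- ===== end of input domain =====

-- B replaces A's nested gt×top-k flag-setting loops by a single scan for the first matching
-- rank, from which all four flags follow; return-value equivalence is proved on Pre_ (no asserts fire there).

-- shared helper: topk_entity_ids[i].split('|'), on code-point lists (string equality = list equality)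
def pvPreds (topk : List String) (i : Nat) : List (List Char) :=
  PySem.Chars.splitOn (topk.getD i "").toList ['|']

-- ===== PORT A =====
-- the 'assert' cannot fire inside Pre_check_label and is not modelled
def check_label (gt_entity_ids : List String) (topk_entity_ids : List String) : Int × Int × Int × Int :=
  gt_entity_ids.foldl (fun st g =>
    (List.range (min 20 topk_entity_ids.length)).foldl (fun st i =>
      if g.toList ∈ pvPreds topk_entity_ids i then
        (if i < 1 then 1 else st.1, if i < 5 then 1 else st.2.1,
         if i < 10 then 1 else st.2.2.1, if i < 20 then 1 else st.2.2.2)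
      else st) st) ((0 : Int), (0 : Int), (0 : Int), (0 : Int))

-- ===== PORT B =====
-- the 'assert' cannot fire inside Pre_check_label and is not modelled
def check_label_alt (gt_entity_ids : List String) (topk_entity_ids : List String) : Int × Int × Int × Int :=
  if gt_entity_ids.isEmpty then (0, 0, 0, 0) else
  let gtset : PySem.Set (List Char) := PySem.Set.ofList (gt_entity_ids.map String.toList)
  let best := (List.range (min 20 topk_entity_ids.length)).foldl (fun b i =>
    match b with
    | some x => some x
    | none =>
      if (pvPreds topk_entity_ids i).any (fun p => PySem.Set.contains gtset p)
      then some i else none) none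
  match best with
  | none => (0, 0, 0, 0)
  | some b => (if b < 1 then 1 else 0, if b < 5 then 1 else 0,
               if b < 10 then 1 else 0, if b < 20 then 1 else 0)

-- ===== PRECONDITION & SPEC =====
-- Pre_ excludes exactly the inputs on which Python A raises AssertionError: a nonempty
-- gt list together with a '+' inside one of the first min(20, len) top-k entries.
def Pre_check_label (gt_entity_ids : List String) (topk_entity_ids : List String) : Prop :=
  (gt_entity_ids.isEmpty || (topk_entity_ids.take 20).all (fun s => !(PySem.Str.isIn "+" s))) = true
instance (gt_entity_ids : List String) (topk_entity_ids : List String) : Decidable (Pre_check_label gt_entity_ids topk_entity_ids) := by unfold Pre_check_label; infer_instance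
def pvWitness_check_label : List String × List String := (["a", "zz"], ["b|c", "a", "d"])

def Spec_check_label (gt_entity_ids : List String) (topk_entity_ids : List String) (out : Int × Int × Int × Int) : Prop := out = check_label_alt gt_entity_ids topk_entity_ids
instance (gt_entity_ids : List String) (topk_entity_ids : List String) (out : Int × Int × Int × Int) : Decidable (Spec_check_label gt_entity_ids topk_entity_ids out) := by unfold Spec_check_label; infer_instance

-- ===== CLAIM (what is proved, stated in full; the proofs are below) =====
def Claim_equal_check_label : Prop := ∀ (gt_entity_ids : List String) (topk_entity_ids : List String), Dom_check_label gt_entity_ids topk_entity_ids → Pre_check_label gt_entity_ids topk_entity_ids → Spec_check_label gt_entity_ids topk_entity_ids (check_label gt_entity_ids topk_entity_ids)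

-- ===== LEMMAS AND PROOFS =====

def pvP (gt topk : List String) (i : Nat) : Bool :=
  (pvPreds topk i).any (fun p => PySem.Set.contains (PySem.Set.ofList (gt.map String.toList)) p)

lemma pvIteOr (p q : Bool) (c : Int) :
    (if q then (1 : Int) else if p then 1 else c) = if (p || q) then 1 else c := by
  cases p <;> cases q <;> simp

-- A's inner loop sets each flag iff some rank i with i < K matches g
lemma innerA (topk : List String) (g : String) (l : List Nat) :
    ∀ st : Int × Int × Int × Int,
    l.foldl (fun st i =>
      if g.toList ∈ pvPreds topk i then
        (if i < 1 then 1 else st.1, if i < 5 then 1 else st.2.1,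
         if i < 10 then 1 else st.2.2.1, if i < 20 then 1 else st.2.2.2)
      else st) st
    = (if l.any (fun i => decide (g.toList ∈ pvPreds topk i) && decide (i < 1)) then 1 else st.1,
       if l.any (fun i => decide (g.toList ∈ pvPreds topk i) && decide (i < 5)) then 1 else st.2.1,
       if l.any (fun i => decide (g.toList ∈ pvPreds topk i) && decide (i < 10)) then 1 else st.2.2.1,
       if l.any (fun i => decide (g.toList ∈ pvPreds topk i) && decide (i < 20)) then 1 else st.2.2.2) := by
  induction l with
  | nil => intro st; simp
  | cons a l ih =>
    intro st
    rw [List.foldl_cons, ih]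
    clear ih
    by_cases hm : g.toList ∈ pvPreds topk a <;>
      simp [List.any_cons, hm] <;>
      refine ⟨?_, ?_, ?_, ?_⟩ <;> split_ifs <;> simp_all <;>
      (exfalso; rename_i hall hge hor;
       rcases hor with h | ⟨x, hx, hgx, hlt⟩
       · omega
       · exact absurd (hall x hx hgx) (by omega))

-- A's whole computation, characterised by four existential tests
lemma wholeA (topk gt : List String) (l : List Nat) :
    ∀ st : Int × Int × Int × Int,
    gt.foldl (fun st g =>
      l.foldl (fun st i =>
        if g.toList ∈ pvPreds topk i then
          (if i < 1 then 1 else st.1, if i < 5 then 1 else st.2.1,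
           if i < 10 then 1 else st.2.2.1, if i < 20 then 1 else st.2.2.2)
        else st) st) st
    = (if gt.any (fun g => l.any (fun i => decide (g.toList ∈ pvPreds topk i) && decide (i < 1))) then 1 else st.1,
       if gt.any (fun g => l.any (fun i => decide (g.toList ∈ pvPreds topk i) && decide (i < 5))) then 1 else st.2.1,
       if gt.any (fun g => l.any (fun i => decide (g.toList ∈ pvPreds topk i) && decide (i < 10))) then 1 else st.2.2.1,
       if gt.any (fun g => l.any (fun i => decide (g.toList ∈ pvPreds topk i) && decide (i < 20))) then 1 else st.2.2.2) := by
  induction gt with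
  | nil => intro st; simp
  | cons a gt ih =>
    intro st
    rw [List.foldl_cons, ih, innerA]
    simp only [List.any_cons]
    refine Prod.ext ?_ (Prod.ext ?_ (Prod.ext ?_ ?_)) <;> simp only [] <;> rw [pvIteOr] <;> rfl

-- a first-match fold is List.find?
lemma foldFirst_some (f : Option Nat → Nat → Option Nat)
    (hsome : ∀ x i, f (some x) i = some x) :
    ∀ (l : List Nat) (x : Nat), l.foldl f (some x) = some x := by
  intro l
  induction l with
  | nil => intro x; rfl
  | cons a l ih => intro x; rw [List.foldl_cons, hsome]; exact ih x

lemma foldFirst_none (p : Nat → Bool) (f : Option Nat → Nat → Option Nat)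
    (hsome : ∀ x i, f (some x) i = some x)
    (hnone : ∀ i, f none i = if p i then some i else none) :
    ∀ l : List Nat, l.foldl f none = l.find? p := by
  intro l
  induction l with
  | nil => rfl
  | cons a l ih =>
    rw [List.foldl_cons, hnone]
    by_cases hp : p a
    · simp [hp, foldFirst_some f hsome]
    · simp [hp, ih]

-- the two existential shapes coincide (swap the two quantifiers; set membership = list membership)
lemma any_swap (topk gt : List String) (l : List Nat) (K : Nat) :
    gt.any (fun g => l.any (fun i => decide (g.toList ∈ pvPreds topk i) && decide (i < K)))
      = l.any (fun i => pvP gt topk i && decide (i < K)) := by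
  rw [Bool.eq_iff_iff]
  simp only [pvP, List.any_eq_true, Bool.and_eq_true, decide_eq_true_eq,
    PySem.Set.contains, List.contains_eq_mem, PySem.Set.mem_ofList, List.mem_map]
  constructor
  · rintro ⟨g, hg, i, hi, hm, hK⟩; exact ⟨i, hi, ⟨g.toList, hm, g, hg, rfl⟩, hK⟩
  · rintro ⟨i, hi, ⟨p, hp, g, hg, rfl⟩, hK⟩; exact ⟨g, hg, i, hi, hp, hK⟩

-- find? = none kills every test
lemma any_of_find_none (gt topk : List String) (l : List Nat)
    (h : l.find? (pvP gt topk) = none) (K : Nat) :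
    l.any (fun i => pvP gt topk i && decide (i < K)) = false := by
  rw [List.find?_eq_none] at h
  simp only [List.any_eq_false, Bool.and_eq_true, not_and, decide_eq_true_eq]
  intro i hi hP
  exact absurd hP (by simpa using h i hi)

-- on a strictly increasing list, find? = some b turns each test into b < K
lemma any_of_find_some (gt topk : List String) (K b : Nat) :
    ∀ l : List Nat, l.Pairwise (· < ·) → l.find? (pvP gt topk) = some b →
    l.any (fun i => pvP gt topk i && decide (i < K)) = decide (b < K) := by
  intro l
  induction l with
  | nil => intro _ h; simp at h
  | cons a l ih =>
    intro hpw hf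
    have hpw' := (List.pairwise_cons.mp hpw)
    by_cases hPa : pvP gt topk a
    · rw [List.find?_cons_of_pos hPa] at hf
      injection hf with hba; subst hba
      by_cases hK : a < K
      · simp [List.any_cons, hPa, hK]
      · have hlt : ∀ i ∈ l, ¬ (i < K) := fun i hi => by
          have := hpw'.1 i hi; omega
        simp only [List.any_cons, hPa, Bool.true_and, hK, decide_false, Bool.false_or]
        rw [Bool.eq_false_iff]
        intro hc
        rcases List.any_eq_true.mp hc with ⟨i, hi, hc2⟩
        exact hlt i hi (by simp only [Bool.and_eq_true, decide_eq_true_eq] at hc2; exact hc2.2)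
    · rw [List.find?_cons_of_neg (by simpa using hPa)] at hf
      simp [List.any_cons, hPa, ih hpw'.2 hf]

-- ===== VERDICT (by name: the statement is the Claim_ definition above) =====
theorem check_label_spec : Claim_equal_check_label := by
  intro gt topk _ _
  unfold Spec_check_label check_label check_label_alt
  by_cases hemp : gt.isEmpty
  · have : gt = [] := List.isEmpty_iff.mp hemp
    subst this; simp
  · simp only [hemp, Bool.false_eq_true, if_false]
    rw [wholeA topk gt (List.range (min 20 topk.length)),
        foldFirst_none (pvP gt topk) _ (fun x i => rfl) (fun i => rfl)]
    have hpw : (List.range (min 20 topk.length)).Pairwise (· < ·) := List.pairwise_lt_range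
    cases hf : (List.range (min 20 topk.length)).find? (pvP gt topk) with
    | none =>
      simp only [any_swap, any_of_find_none gt topk _ hf]
      simp
    | some b =>
      simp only [any_swap, any_of_find_some gt topk _ b _ hpw hf]
      rcases Nat.lt_or_ge b 1 with h1 | h1 <;> rcases Nat.lt_or_ge b 5 with h5 | h5 <;>
        rcases Nat.lt_or_ge b 10 with h10 | h10 <;> rcases Nat.lt_or_ge b 20 with h20 | h20 <;>
        simp_all
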